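-- pv_equiv track=rewrite | github.com/Anshit01/convocation-degree | smart-contracts/smart.py | separate_options
-- ===== SOURCE A (Python) =====
-- def separate_options(args: list[str]):
--     options = []
--     params = []
--     for arg in args:
--         if arg.startswith("--"):
--             options.append(arg[2:])
--         else:
--             params.append(arg)
--     return [params, options]
-- ===== SOURCE B (Python) =====
-- def separate_options(args: list[str]):
--     params = [a for a in args if not a.startswith("--")]
--     options = [a[2:] for a in args if a.startswith("--")]
--     return [params, options]
-- ===== Notes on version B (the rewrite author's own statement) =====
-- stated objective: simpler
-- what changed: Replaces the single accumulating loop over a mutable pair of lists with two independent filtering comprehensions (filter / filter+map) over the input.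
import Mathlib
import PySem

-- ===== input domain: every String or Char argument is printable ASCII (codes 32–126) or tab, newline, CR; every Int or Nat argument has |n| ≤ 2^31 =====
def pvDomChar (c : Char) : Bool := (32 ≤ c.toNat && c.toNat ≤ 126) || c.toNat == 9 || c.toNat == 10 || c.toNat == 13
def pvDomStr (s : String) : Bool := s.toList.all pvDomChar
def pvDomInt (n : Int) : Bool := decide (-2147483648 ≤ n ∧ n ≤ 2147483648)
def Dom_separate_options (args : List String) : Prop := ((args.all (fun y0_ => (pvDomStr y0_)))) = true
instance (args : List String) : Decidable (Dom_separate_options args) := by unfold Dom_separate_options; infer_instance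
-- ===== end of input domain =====

-- B: two independent filtering passes (filter / filter+map) instead of one append loop over a pair; same cost, simpler.
-- ===== PORT A =====
def separate_options (args : List String) : List (List String) :=
  let st := args.foldl
    (fun (st : List String × List String) arg =>
      if PySem.Str.startswith arg "--" then
        (st.1 ++ [PySem.Str.slice arg (some 2) none], st.2)
      else
        (st.1, st.2 ++ [arg]))
    ([], [])
  [st.2, st.1]

-- ===== PORT B =====
def separate_options_alt (args : List String) : List (List String) :=
  let params := args.filter (fun a => !(PySem.Str.startswith a "--"))
  let options := (args.filter (fun a => PySem.Str.startswith a "--")).map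
    (fun a => PySem.Str.slice a (some 2) none)
  [params, options]

-- ===== PRECONDITION & SPEC =====
def Spec_separate_options (args : List String) (out : List (List String)) : Prop := out = separate_options_alt args
instance (args : List String) (out : List (List String)) : Decidable (Spec_separate_options args out) := by unfold Spec_separate_options; infer_instance

-- ===== CLAIM (what is proved, stated in full; the proofs are below) =====
def Claim_equal_separate_options : Prop := ∀ (args : List String), Dom_separate_options args → Spec_separate_options args (separate_options args)

-- ===== LEMMAS AND PROOFS =====

-- ===== VERDICT (by name: the statement is the Claim_ definition above) =====
lemma sep_foldl (args : List String) (os ps : List String) :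
    args.foldl
      (fun (st : List String × List String) arg =>
        if PySem.Str.startswith arg "--" then
          (st.1 ++ [PySem.Str.slice arg (some 2) none], st.2)
        else
          (st.1, st.2 ++ [arg]))
      (os, ps)
    = (os ++ (args.filter (fun a => PySem.Str.startswith a "--")).map
            (fun a => PySem.Str.slice a (some 2) none),
       ps ++ args.filter (fun a => !(PySem.Str.startswith a "--"))) := by
  induction args generalizing os ps with
  | nil => simp
  | cons a t ih =>
    by_cases h : PySem.Str.startswith a "--" = true <;>
      simp [PySem.Str.startswith_eq] at h ih <;>
      simp [List.foldl_cons, h, ih]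

theorem separate_options_spec : Claim_equal_separate_options := by
  intro args _
  unfold Spec_separate_options separate_options separate_options_alt
  simp only [sep_foldl, List.nil_append]
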